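-- pv_equiv track=rewrite | github.com/parakawa/genom_classify | src/encoding.py | decode_kmer
-- ===== SOURCE A (Python) =====
-- def decode_kmer(encoded_kmer, k):
--     """convert an encoded k-mer back to its string representation"""
--     decoding = ['A', 'C', 'G', 'T']
--     kmer = []
--     for _ in range(k):
--         base = encoded_kmer & 0b11  # take the last 2 bits
--         kmer.append(decoding[base])
--         encoded_kmer >>= 2
--     return ''.join(reversed(kmer))
-- ===== SOURCE B (Python) =====
-- def decode_kmer(encoded_kmer, k):
--     """convert an encoded k-mer back to its string representation"""
--     if k <= 0:
--         return ''
--     if k == 1: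
--         return 'ACGT'[encoded_kmer & 0b11]
--     h = k // 2  # number of bases in the low half
--     return (decode_kmer(encoded_kmer >> (2 * h), k - h)
--             + decode_kmer(encoded_kmer & ((1 << (2 * h)) - 1), h))
-- ===== Notes on version B (the rewrite author's own statement) =====
-- stated objective: alternative
-- what changed: Replaces A's linear stateful loop (shift-accumulate a list LSB-first, then reverse and join) with a divide-and-conquer recursion: split the k-mer into a high half (encoded_kmer >> 2h) and a low half (encoded_kmer & mask), decode each recursively and concatenate, with a single-base lookup at the leaves and no mutable state or reversal.
import Mathlib
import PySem

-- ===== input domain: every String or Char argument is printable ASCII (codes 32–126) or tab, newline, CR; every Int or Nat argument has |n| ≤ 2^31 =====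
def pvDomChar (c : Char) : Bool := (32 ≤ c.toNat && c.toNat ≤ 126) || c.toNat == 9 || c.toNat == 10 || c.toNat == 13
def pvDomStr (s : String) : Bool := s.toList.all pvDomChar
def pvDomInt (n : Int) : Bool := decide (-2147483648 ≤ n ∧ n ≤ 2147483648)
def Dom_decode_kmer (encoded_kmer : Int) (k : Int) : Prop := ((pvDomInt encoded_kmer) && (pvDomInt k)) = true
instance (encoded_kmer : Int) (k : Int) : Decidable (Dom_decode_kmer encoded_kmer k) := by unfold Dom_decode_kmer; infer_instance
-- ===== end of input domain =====

-- B decodes by divide-and-conquer: split the k-mer into high/low halves (shift and mask),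
-- decode each half recursively and concatenate — instead of A's linear shift-accumulate-reverse loop.


-- ===== PORT A =====
-- 'x & 0b11' is ported as PySem.Int.mod x 4 and 'x >>= 2' as PySem.Int.floordiv x 4:
-- exact for every Python int, negatives included (two's-complement & / floor shift).
-- decoding[base] is ported with pyGetD; base = x mod 4 is always in range, so the default is never read.
def decode_kmer (encoded_kmer : Int) (k : Int) : String :=
  let decoding : List String := ["A", "C", "G", "T"]
  let st := (PySem.List.pyRange 0 k 1).foldl
    (fun (st : Int × List String) _ =>
      let base := PySem.Int.mod st.1 4
      (PySem.Int.floordiv st.1 4, st.2 ++ [PySem.List.pyGetD decoding base ""]))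
    (encoded_kmer, ([] : List String))
  PySem.Str.join "" st.2.reverse

-- ===== PORT B =====
-- 'e >> (2*h)' is ported as floordiv e 2^(2*h) and 'e & ((1 << (2*h)) - 1)' as PySem.Int.mod e 2^(2*h):
-- exact for every Python int (for a positive modulus 2^n, Python's e & (2^n - 1) IS e mod 2^n).
-- 'ACGT'[e & 0b11] is ported with Str.pyGet? + getD; the index e mod 4 is always in range.
def decode_kmer_alt (encoded_kmer : Int) (k : Int) : String :=
  if k ≤ 0 then ""
  else if k = 1 then ((PySem.Str.pyGet? "ACGT" (PySem.Int.mod encoded_kmer 4)).map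
    (fun c => String.ofList [c])).getD ""
  else
    let h := PySem.Int.floordiv k 2
    decode_kmer_alt (PySem.Int.floordiv encoded_kmer (2 ^ (2 * h).toNat)) (k - h)
      ++ decode_kmer_alt (PySem.Int.mod encoded_kmer (2 ^ (2 * h).toNat)) h
termination_by k.toNat
decreasing_by
  · have h2 : PySem.Int.floordiv k 2 = k / 2 := PySem.Int.floordiv_eq_ediv_of_pos (by norm_num)
    rw [h2]; omega
  · have h2 : PySem.Int.floordiv k 2 = k / 2 := PySem.Int.floordiv_eq_ediv_of_pos (by norm_num)
    rw [h2]; omega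

-- ===== PRECONDITION & SPEC =====
def Spec_decode_kmer (encoded_kmer : Int) (k : Int) (out : String) : Prop := out = decode_kmer_alt encoded_kmer k
instance (encoded_kmer : Int) (k : Int) (out : String) : Decidable (Spec_decode_kmer encoded_kmer k out) := by unfold Spec_decode_kmer; infer_instance

-- ===== CLAIM (what is proved, stated in full; the proofs are below) =====
def Claim_equal_decode_kmer : Prop := ∀ (encoded_kmer : Int) (k : Int), Dom_decode_kmer encoded_kmer k → Spec_decode_kmer encoded_kmer k (decode_kmer encoded_kmer k)

-- ===== LEMMAS AND PROOFS =====
-- the j-th (LSB-first) decoded base of e, as a Char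
def pvC (e : Int) (j : Nat) : Char :=
  PySem.List.pyGetD ['A', 'C', 'G', 'T'] (PySem.Int.mod (PySem.Int.floordiv e (4 ^ j)) 4) 'A'

-- the decoded k-mer of n bases, MSB first (LSB-first base list reversed)
def pvChs (e : Int) (n : Nat) : List Char := ((List.range n).map (pvC e)).reverse

-- the same base as a 1-char String (the shape A's loop produces)
def pvStr (e : Int) (j : Nat) : String :=
  PySem.List.pyGetD ["A", "C", "G", "T"] (PySem.Int.mod (PySem.Int.floordiv e (4 ^ j)) 4) ""

lemma pvFloordiv_one (n : Int) : PySem.Int.floordiv n 1 = n := by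
  rw [PySem.Int.floordiv_eq_ediv_of_pos (by norm_num)]; exact Int.ediv_one n

lemma pvFloordiv_floordiv (n : Int) (a b : Nat) :
    PySem.Int.floordiv (PySem.Int.floordiv n (4 ^ a)) (4 ^ b) = PySem.Int.floordiv n (4 ^ (a + b)) := by
  rw [PySem.Int.floordiv_eq_ediv_of_pos (by positivity), PySem.Int.floordiv_eq_ediv_of_pos (by positivity),
    PySem.Int.floordiv_eq_ediv_of_pos (by positivity)]
  rw [Int.ediv_ediv_of_nonneg (by positivity), pow_add]

lemma pvStr_toList (e : Int) (j : Nat) : (pvStr e j).toList = [pvC e j] := by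
  unfold pvStr pvC
  have h4 : (0:Int) < 4 := by norm_num
  rw [PySem.Int.mod_eq_emod_of_pos h4]
  set x := PySem.Int.floordiv e (4 ^ j) with hx
  have h0 : 0 ≤ x % 4 := Int.emod_nonneg x (by norm_num)
  have h1 : x % 4 < 4 := Int.emod_lt_of_pos x h4
  interval_cases h : x % 4 <;> decide

lemma pvC_shift (e : Int) (h j : Nat) :
    pvC (PySem.Int.floordiv e (4 ^ h)) j = pvC e (h + j) := by
  unfold pvC; rw [pvFloordiv_floordiv]

lemma pvC_mod (e : Int) (h j : Nat) (hj : j < h) :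
    pvC (PySem.Int.mod e (4 ^ h)) j = pvC e j := by
  unfold pvC
  have key : PySem.Int.mod (PySem.Int.floordiv (PySem.Int.mod e (4 ^ h)) (4 ^ j)) 4
      = PySem.Int.mod (PySem.Int.floordiv e (4 ^ j)) 4 := by
    rw [PySem.Int.mod_eq_emod_of_pos (by positivity : (0:Int) < 4 ^ h),
        PySem.Int.floordiv_eq_ediv_of_pos (by positivity : (0:Int) < 4 ^ j),
        PySem.Int.floordiv_eq_ediv_of_pos (by positivity : (0:Int) < 4 ^ j),
        PySem.Int.mod_eq_emod_of_pos (by norm_num : (0:Int) < 4),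
        PySem.Int.mod_eq_emod_of_pos (by norm_num : (0:Int) < 4)]
    have hmoddef : e % (4:Int) ^ h = e + (-(4 ^ (h - j) * (e / 4 ^ h))) * 4 ^ j := by
      rw [Int.emod_def, show (4:Int) ^ h = 4 ^ (h - j) * 4 ^ j by
        rw [← pow_add]; congr 1; omega]
      ring
    rw [hmoddef, Int.add_mul_ediv_right _ _ (by positivity : (4:Int) ^ j ≠ 0)]
    obtain ⟨m, hm⟩ : (4:Int) ∣ 4 ^ (h - j) := dvd_pow_self 4 (by omega)
    rw [hm, show e / 4 ^ j + -(4 * m * (e / 4 ^ h)) = e / 4 ^ j + 4 * (-(m * (e / 4 ^ h))) by ring,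
      Int.add_mul_emod_self_left]
  rw [key]

-- splitting the MSB-first decode at position h (low h bases / high m bases)
lemma pvChs_split (e : Int) (h m : Nat) :
    pvChs e (h + m) = pvChs (PySem.Int.floordiv e (4 ^ h)) m ++ pvChs (PySem.Int.mod e (4 ^ h)) h := by
  unfold pvChs
  rw [List.range_add, List.map_append, List.reverse_append, List.map_map]
  congr 1
  · congr 1
    apply List.map_congr_left
    intro j _
    simp only [Function.comp_apply]
    rw [pvC_shift]
  · congr 1
    apply List.map_congr_left
    intro j hj
    rw [pvC_mod e h j (List.mem_range.mp hj)]

-- A's loop characterised: the accumulated list is the LSB-first base list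
lemma pvLoopA (l : List Int) (e : Int) (acc : List String) :
    (l.foldl (fun (st : Int × List String) _ =>
        let base := PySem.Int.mod st.1 4
        (PySem.Int.floordiv st.1 4, st.2 ++ [PySem.List.pyGetD ["A", "C", "G", "T"] base ""]))
      (e, acc)).2
    = acc ++ (List.range l.length).map (pvStr e) := by
  induction l generalizing e acc with
  | nil => simp
  | cons a l ih =>
      simp only [List.foldl_cons, List.length_cons]
      rw [ih, List.range_succ_eq_map, List.map_cons, List.map_map]
      have h0 : pvStr e 0 = PySem.List.pyGetD ["A", "C", "G", "T"] (PySem.Int.mod e 4) "" := by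
        unfold pvStr; rw [pow_zero, pvFloordiv_one]
      have hs : ∀ j : Nat, pvStr e (j + 1) = pvStr (PySem.Int.floordiv e 4) j := by
        intro j; unfold pvStr
        have := pvFloordiv_floordiv e 1 j
        rw [pow_one, show 1 + j = j + 1 from Nat.add_comm 1 j] at this
        rw [this]
      rw [← h0]
      simp only [Function.comp_def, Nat.succ_eq_add_one, hs]
      simp

-- A's output characterised through pvChs
lemma pvA_toList (e k : Int) : (decode_kmer e k).toList = pvChs e k.toNat := by
  unfold decode_kmer
  simp only []
  rw [pvLoopA, List.nil_append, PySem.Str.toList_join,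
    show (PySem.List.pyRange 0 k 1).length = k.toNat by simp [PySem.List.length_pyRange_one]]
  have hmap : List.map String.toList (List.map (pvStr e) (List.range k.toNat))
      = ((List.range k.toNat).map (pvC e)).map (fun c => [c]) := by
    simp only [List.map_map]
    apply List.map_congr_left
    intro j _
    simp only [Function.comp_apply]
    exact pvStr_toList e j
  rw [List.map_reverse, hmap, ← List.map_reverse]
  have hsep : ("" : String).toList = [] := rfl
  rw [hsep, PySem.Chars.join_nil_singletons]
  rfl

-- B's output characterised through pvChs (strong induction on k.toNat)
lemma pvB_toList (n : Nat) (e k : Int) (hk : k.toNat = n) :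
    (decode_kmer_alt e k).toList = pvChs e n := by
  induction n using Nat.strong_induction_on generalizing e k with
  | _ n ih =>
    rw [decode_kmer_alt]
    by_cases h0 : k ≤ 0
    · simp only [h0, if_true]
      have : n = 0 := by omega
      subst this; rfl
    · simp only [h0, if_false]
      by_cases h1 : k = 1
      · simp only [h1, if_true]
        have hn1 : n = 1 := by omega
        subst hn1
        have hch : pvChs e 1 = [pvC e 0] := by unfold pvChs; rfl
        rw [hch]
        have : pvC e 0 = PySem.List.pyGetD ['A', 'C', 'G', 'T'] (PySem.Int.mod e 4) 'A' := by
          unfold pvC; rw [pow_zero, pvFloordiv_one]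
        rw [this]
        have h4 : (0:Int) < 4 := by norm_num
        rw [PySem.Int.mod_eq_emod_of_pos h4]
        have hlo : 0 ≤ e % 4 := Int.emod_nonneg e (by norm_num)
        have hhi : e % 4 < 4 := Int.emod_lt_of_pos e h4
        interval_cases hm : e % 4 <;> decide
      · simp only [h1, if_false]
        have hk2 : 2 ≤ k := by omega
        have hfd : PySem.Int.floordiv k 2 = k / 2 := PySem.Int.floordiv_eq_ediv_of_pos (by norm_num)
        set h := PySem.Int.floordiv k 2 with hhdef
        have hhv : h = k / 2 := hfd
        have hpos : 1 ≤ h := by omega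
        have hlt : h < k := by omega
        have hpow : (2:Int) ^ (2 * h).toNat = 4 ^ h.toNat := by
          rw [show (2 * h).toNat = 2 * h.toNat by omega, pow_mul]; norm_num
        rw [hpow]
        have e1 := ih (k - h).toNat (by omega) (PySem.Int.floordiv e (4 ^ h.toNat)) (k - h) rfl
        have e2 := ih h.toNat (by omega) (PySem.Int.mod e (4 ^ h.toNat)) h rfl
        have hsplit := pvChs_split e h.toNat (n - h.toNat)
        rw [show h.toNat + (n - h.toNat) = n from by omega] at hsplit
        rw [String.toList_append, e1, e2,
          show (k - h).toNat = n - h.toNat from by omega, hsplit]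

theorem pv_ports_agree (e k : Int) : decode_kmer e k = decode_kmer_alt e k := by
  have h1 := pvA_toList e k
  have h2 := pvB_toList k.toNat e k rfl
  have : (decode_kmer e k).toList = (decode_kmer_alt e k).toList := by rw [h1, h2]
  exact String.toList_injective this

-- ===== VERDICT (by name: the statement is the Claim_ definition above) =====
theorem decode_kmer_spec : Claim_equal_decode_kmer := by
  intro e k _
  unfold Spec_decode_kmer
  exact pv_ports_agree e k
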